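-- pv_equiv track=rewrite | github.com/junho-one/algorithm | programmers/greedy/numberGame.py | solution
-- ===== SOURCE A (Python) =====
-- def solution(A, B):
--     answer = 0
--
--     A = sorted(A)
--     B = sorted(B)
--
--     b_idx = 0
--     for a in A:
--
--         while b_idx < len(B) and B[b_idx] <= a:
--             b_idx += 1
--
--         if b_idx == len(B):
--             break
--
--         answer += 1
--         b_idx += 1
--
--     return answer
-- ===== SOURCE B (Python) =====
-- def solution(A, B):
--     A = sorted(A)
--     B = sorted(B)
--     n, m = len(A), len(B)
--
--     def check(k):
--         # feasible iff the k largest of B pairwise beat the k smallest of A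
--         for j in range(k):
--             if B[m - k + j] <= A[j]:
--                 return False
--         return True
--
--     lo, hi = 0, min(n, m)
--     while lo < hi:
--         mid = (lo + hi + 1) // 2
--         if check(mid):
--             lo = mid
--         else:
--             hi = mid - 1
--     return lo
-- ===== Notes on version B (the rewrite author's own statement) =====
-- stated objective: alternative
-- what changed: B binary-searches the answer k over [0, min(len(A),len(B))] using a feasibility check (do the k largest of sorted B pairwise beat the k smallest of sorted A?), instead of A's greedy pointer sweep over sorted A with an inner skip-while over B.
import Mathlib
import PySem

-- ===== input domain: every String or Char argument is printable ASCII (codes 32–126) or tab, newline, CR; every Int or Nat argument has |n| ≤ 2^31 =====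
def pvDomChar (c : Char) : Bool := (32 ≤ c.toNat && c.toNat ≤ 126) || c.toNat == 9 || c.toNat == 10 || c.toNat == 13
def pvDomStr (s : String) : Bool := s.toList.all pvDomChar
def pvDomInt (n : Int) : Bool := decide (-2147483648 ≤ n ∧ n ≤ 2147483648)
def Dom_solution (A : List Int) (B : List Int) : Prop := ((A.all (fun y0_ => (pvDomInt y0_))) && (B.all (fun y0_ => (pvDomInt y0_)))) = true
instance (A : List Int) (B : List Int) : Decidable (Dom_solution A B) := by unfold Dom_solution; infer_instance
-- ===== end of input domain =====

-- B replaces A's greedy pointer sweep by a binary search on the answer k with a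
-- pairwise feasibility check of the k largest B's against the k smallest A's (objective: alternative).


-- ===== PORT A =====
-- inner while-loop: advance b_idx while b_idx < len(B) and B[b_idx] <= a
def skipIdx (B : List Int) (a : Int) (i : Nat) : Nat :=
  if h : i < B.length then
    if B[i] ≤ a then skipIdx B a (i + 1) else i
  else i
termination_by B.length - i

-- for a in A: skip; if b_idx == len(B): break; answer += 1; b_idx += 1
def loopA (sB : List Int) : List Int → Nat → Int → Int
  | [], _, ans => ans
  | a :: as, i, ans =>
    let j := skipIdx sB a i
    if j = sB.length then ans else loopA sB as (j + 1) (ans + 1)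

def solution (A : List Int) (B : List Int) : Int :=
  loopA (PySem.List.sorted B (fun x => x) false) (PySem.List.sorted A (fun x => x) false) 0 0

-- ===== PORT B =====
-- def check(k): for j in range(k): if B[m-k+j] <= A[j]: return False; return True
-- (indices are always in range at every call B's algorithm makes: 0 ≤ k ≤ min(n, m), j < k)
def checkLoop (sA sB : List Int) (k j : Nat) : Bool :=
  if j < k then
    if sB.getD (sB.length - k + j) 0 ≤ sA.getD j 0 then false
    else checkLoop sA sB k (j + 1)
  else true
termination_by k - j

-- while lo < hi: mid = (lo+hi+1)//2; if check(mid): lo = mid else: hi = mid - 1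
def bsearch (sA sB : List Int) (lo hi : Nat) : Nat :=
  if h : lo < hi then
    if checkLoop sA sB ((lo + hi + 1) / 2) 0 then bsearch sA sB ((lo + hi + 1) / 2) hi
    else bsearch sA sB lo ((lo + hi + 1) / 2 - 1)
  else lo
termination_by hi - lo
decreasing_by all_goals omega

def solution_alt (A : List Int) (B : List Int) : Int :=
  let sA := PySem.List.sorted A (fun x => x) false
  let sB := PySem.List.sorted B (fun x => x) false
  (bsearch sA sB 0 (min sA.length sB.length) : Int)

-- ===== PRECONDITION & SPEC =====
def Spec_solution (A : List Int) (B : List Int) (out : Int) : Prop := out = solution_alt A B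
instance (A : List Int) (B : List Int) (out : Int) : Decidable (Spec_solution A B out) := by unfold Spec_solution; infer_instance

-- ===== CLAIM (what is proved, stated in full; the proofs are below) =====
def Claim_equal_solution : Prop := ∀ (A : List Int) (B : List Int), Dom_solution A B → Spec_solution A B (solution A B)

-- ===== LEMMAS AND PROOFS =====

-- list-level model of A's loop
def fA : List Int → List Int → Int
  | [], _ => 0
  | a :: as, bs =>
    match bs.dropWhile (fun b => decide (b ≤ a)) with
    | [] => 0
    | _ :: t => 1 + fA as t

-- Nat-valued head-to-head model of the greedy count
def gN : List Int → List Int → Nat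
  | _, [] => 0
  | [], _ :: bs => gN [] bs
  | a :: as, b :: bs => if a < b then 1 + gN as bs else gN (a :: as) bs

-- feasibility: the k largest of bs pairwise beat the k smallest of as
def feas (as bs : List Int) (k : Nat) : Prop :=
  k ≤ as.length ∧ k ≤ bs.length ∧
    List.Forall₂ (fun x y => x < y) (as.take k) (bs.drop (bs.length - k))

theorem fA_eq_gN : ∀ (bs as : List Int), fA as bs = (gN as bs : Int) := by
  intro bs
  induction bs with
  | nil => intro as; cases as <;> simp [fA, gN]
  | cons b bs ih =>
    intro as
    cases as with
    | nil => simp [fA, gN, ← ih []]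
    | cons a as =>
      by_cases hba : b ≤ a
      · have hnab : ¬ a < b := not_lt.mpr hba
        simp only [fA, gN, List.dropWhile, hba, decide_true, if_neg hnab]
        rw [← ih (a :: as)]
        rfl
      · have hab : a < b := lt_of_not_ge hba
        simp only [fA, gN, List.dropWhile, hba, decide_false, if_pos hab]
        rw [ih as]
        push_cast
        ring

theorem skipIdx_drop (B : List Int) (a : Int) :
    ∀ i, B.drop (skipIdx B a i) = (B.drop i).dropWhile (fun b => decide (b ≤ a)) := by
  intro i
  induction i using skipIdx.induct (B := B) (a := a) with
  | case1 i h hle ih =>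
    rw [skipIdx, dif_pos h, if_pos hle, ih,
      List.drop_eq_getElem_cons h, List.dropWhile_cons_of_pos (by simpa using hle)]
  | case2 i h hle =>
    rw [skipIdx, dif_pos h, if_neg hle,
      List.drop_eq_getElem_cons h, List.dropWhile_cons_of_neg (by simpa using hle)]
  | case3 i h =>
    rw [skipIdx, dif_neg h]
    have : B.length ≤ i := le_of_not_gt h
    simp [List.drop_eq_nil_of_le this]

theorem skipIdx_le (B : List Int) (a : Int) : ∀ i, i ≤ B.length → skipIdx B a i ≤ B.length := by
  intro i
  induction i using skipIdx.induct (B := B) (a := a) with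
  | case1 i h hle ih => intro _; rw [skipIdx, dif_pos h, if_pos hle]; exact ih h
  | case2 i h hle => intro hi; rw [skipIdx, dif_pos h, if_neg hle]; exact hi
  | case3 i h => intro hi; rw [skipIdx, dif_neg h]; exact hi

theorem loopA_eq_fA (sB : List Int) :
    ∀ (as : List Int) (i : Nat) (ans : Int), i ≤ sB.length →
      loopA sB as i ans = ans + fA as (sB.drop i) := by
  intro as
  induction as with
  | nil => intro i ans _; simp [loopA, fA]
  | cons a as ih =>
    intro i ans hi
    have hd := skipIdx_drop sB a i
    have hlej := skipIdx_le sB a i hi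
    simp only [loopA]
    by_cases hj : skipIdx sB a i = sB.length
    · have : (sB.drop i).dropWhile (fun b => decide (b ≤ a)) = [] := by
        rw [← hd, hj]; simp
      rw [if_pos hj]
      simp [fA, this]
    · rw [if_neg hj]
      have hjlt : skipIdx sB a i < sB.length := lt_of_le_of_ne hlej hj
      have hcons : sB.drop (skipIdx sB a i)
          = sB[skipIdx sB a i] :: sB.drop (skipIdx sB a i + 1) :=
        List.drop_eq_getElem_cons hjlt
      rw [ih (skipIdx sB a i + 1) (ans + 1) hjlt]
      simp only [fA, ← hd, hcons]
      ring

theorem gN_nil : ∀ bs : List Int, gN [] bs = 0 := by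
  intro bs; induction bs with
  | nil => rfl
  | cons b bs ih => simpa [gN] using ih

theorem gN_nil_right : ∀ as : List Int, gN as [] = 0 := by
  intro as; cases as <;> rfl

theorem gN_feas : ∀ (bs as : List Int), bs.Pairwise (· ≤ ·) → feas as bs (gN as bs) := by
  intro bs
  induction bs with
  | nil =>
    intro as _
    rw [gN_nil_right]
    exact ⟨Nat.zero_le _, Nat.zero_le _, by simp⟩
  | cons b bs ih =>
    intro as hp
    have hpbs : bs.Pairwise (· ≤ ·) := hp.of_cons
    have hble : ∀ x ∈ bs, b ≤ x := (List.pairwise_cons.mp hp).1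
    cases as with
    | nil =>
      rw [gN_nil]
      exact ⟨Nat.zero_le _, Nat.zero_le _, by simp⟩
    | cons a as =>
      by_cases hab : a < b
      · obtain ⟨h1, h2, hF⟩ := ih as hpbs
        simp only [gN, if_pos hab]
        refine ⟨by simp; omega, by simp; omega, ?_⟩
        have htake : (a :: as).take (1 + gN as bs) = a :: as.take (gN as bs) := by
          rw [Nat.add_comm]; rfl
        have hdropidx : (b :: bs).length - (1 + gN as bs) = bs.length - gN as bs := by
          simp; omega
        rw [htake, hdropidx]
        rcases Nat.lt_or_ge (gN as bs) bs.length with hg | hg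
        · have hi : bs.length - gN as bs - 1 < bs.length := by omega
          have hs1 : bs.length - gN as bs = (bs.length - gN as bs - 1) + 1 := by omega
          have hstep : (b :: bs).drop (bs.length - gN as bs)
              = bs.drop (bs.length - gN as bs - 1) := by
            rw [hs1]; rfl
          rw [hstep, List.drop_eq_getElem_cons hi, ← hs1]
          exact List.Forall₂.cons
            (lt_of_lt_of_le hab (hble _ (List.getElem_mem hi))) hF
        · have hgeq : gN as bs = bs.length := le_antisymm h2 hg
          have : bs.length - gN as bs = 0 := by omega
          rw [this, List.drop_zero]
          refine List.Forall₂.cons hab ?_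
          rw [this, List.drop_zero] at hF
          exact hF
      · obtain ⟨h1, h2, hF⟩ := ih (a :: as) hpbs
        simp only [gN, if_neg hab]
        refine ⟨h1, by simp; omega, ?_⟩
        have : (b :: bs).length - gN (a :: as) bs = (bs.length - gN (a :: as) bs) + 1 := by
          simp; omega
        rw [this, List.drop_succ_cons]
        exact hF

theorem gN_max : ∀ (bs as : List Int) (k : Nat), bs.Pairwise (· ≤ ·) →
    feas as bs k → k ≤ gN as bs := by
  intro bs
  induction bs with
  | nil =>
    intro as k _ hf
    have := hf.2.1
    simp at this
    omega
  | cons b bs ih =>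
    intro as k hp hf
    have hpbs : bs.Pairwise (· ≤ ·) := hp.of_cons
    cases as with
    | nil =>
      have := hf.1
      simp at this
      omega
    | cons a as =>
      obtain ⟨h1, h2, hF⟩ := hf
      by_cases hab : a < b
      · simp only [gN, if_pos hab]
        cases k with
        | zero => omega
        | succ k' =>
          have hk'n : k' ≤ as.length := by simp at h1; omega
          have hk'm : k' ≤ bs.length := by simp at h2; omega
          have htl : List.Forall₂ (fun x y => x < y) (as.take k') (bs.drop (bs.length - k')) := by
            have htake : (a :: as).take (k' + 1) = a :: as.take k' := rfl
            have hidx : (b :: bs).length - (k' + 1) = bs.length - k' := by simp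
            rw [htake, hidx] at hF
            rcases Nat.lt_or_ge k' bs.length with hg | hg
            · have hi : bs.length - k' - 1 < bs.length := by omega
              have hs1 : bs.length - k' = (bs.length - k' - 1) + 1 := by omega
              have hstep : (b :: bs).drop (bs.length - k')
                  = bs.drop (bs.length - k' - 1) := by
                rw [hs1]; rfl
              rw [hstep, List.drop_eq_getElem_cons hi, ← hs1] at hF
              exact (List.forall₂_cons.mp hF).2
            · have h0 : bs.length - k' = 0 := by omega
              rw [h0, List.drop_zero] at hF
              rw [h0, List.drop_zero]
              exact (List.forall₂_cons.mp hF).2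
          have := ih as k' hpbs ⟨hk'n, hk'm, htl⟩
          omega
      · simp only [gN, if_neg hab]
        have hkm' : k ≤ bs.length := by
          by_contra hgt
          have hk : k = bs.length + 1 := by simp at h2; omega
          subst hk
          have hidx : (b :: bs).length - (bs.length + 1) = 0 := by simp
          rw [hidx, List.drop_zero] at hF
          have htake : (a :: as).take (bs.length + 1) = a :: as.take bs.length := rfl
          rw [htake] at hF
          exact hab (List.forall₂_cons.mp hF).1
        apply ih (a :: as) k hpbs
        refine ⟨h1, hkm', ?_⟩
        have : (b :: bs).length - k = (bs.length - k) + 1 := by simp; omega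
        rw [this, List.drop_succ_cons] at hF
        exact hF

-- index form of the Forall₂ part of feas
theorem feas_iff_getD (as bs : List Int) (k : Nat) (hn : k ≤ as.length) (hm : k ≤ bs.length) :
    feas as bs k ↔ ∀ j, j < k → as.getD j 0 < bs.getD (bs.length - k + j) 0 := by
  unfold feas
  have hlt : (as.take k).length = k := by simp [Nat.min_eq_left hn]
  have hld : (bs.drop (bs.length - k)).length = k := by simp; omega
  constructor
  · rintro ⟨-, -, hF⟩ j hj
    rw [List.forall₂_iff_get] at hF
    have h1 : j < (as.take k).length := by omega
    have h2 : j < (bs.drop (bs.length - k)).length := by omega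
    have := hF.2 j h1 h2
    simp only [List.get_eq_getElem, List.getElem_take, List.getElem_drop] at this
    rw [List.getD_eq_getElem _ _ (by omega), List.getD_eq_getElem _ _ (by omega)]
    exact this
  · intro h
    refine ⟨hn, hm, ?_⟩
    rw [List.forall₂_iff_get]
    refine ⟨by omega, ?_⟩
    intro i h1 h2
    simp only [List.get_eq_getElem, List.getElem_take, List.getElem_drop]
    have hik : i < k := by omega
    have := h i hik
    rwa [List.getD_eq_getElem _ _ (by omega), List.getD_eq_getElem _ _ (by omega)] at this

theorem checkLoop_iff (sA sB : List Int) (k : Nat) :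
    ∀ j, (checkLoop sA sB k j = true ↔
      ∀ i, j ≤ i → i < k → sA.getD i 0 < sB.getD (sB.length - k + i) 0) := by
  intro j
  induction j using checkLoop.induct (sA := sA) (sB := sB) (k := k) with
  | case1 j hj hle =>
    rw [checkLoop, if_pos hj, if_pos hle]
    simp only [Bool.false_eq_true, false_iff]
    intro h
    exact absurd (h j le_rfl hj) (not_lt.mpr hle)
  | case2 j hj hle ih =>
    rw [checkLoop, if_pos hj, if_neg hle, ih]
    constructor
    · intro h i hji hik
      rcases Nat.eq_or_lt_of_le hji with rfl | hlt
      · exact lt_of_not_ge hle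
      · exact h i hlt hik
    · intro h i hji hik
      exact h i (by omega) hik
  | case3 j hj =>
    rw [checkLoop, if_neg hj]
    simp only [true_iff]
    intro i hji hik
    omega

-- downward closure of feasibility (needs sorted as)
theorem feas_dc (as bs : List Int) (hsa : as.Pairwise (· ≤ ·)) {j k : Nat} (hjk : j ≤ k) :
    feas as bs k → feas as bs j := by
  intro hk
  have hkn := hk.1
  have hkm := hk.2.1
  rw [feas_iff_getD _ _ _ hkn hkm] at hk
  rw [feas_iff_getD _ _ _ (le_trans hjk hkn) (le_trans hjk hkm)]
  intro i hij
  have h1 := hk (i + (k - j)) (by omega)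
  have hmono : as.getD i 0 ≤ as.getD (i + (k - j)) 0 := by
    rw [List.getD_eq_getElem _ _ (by omega), List.getD_eq_getElem _ _ (by omega)]
    rcases Nat.lt_or_ge i (i + (k - j)) with hlt | hge
    · exact (List.pairwise_iff_getElem.mp hsa) i (i + (k - j)) (by omega) (by omega) hlt
    · have he : i + (k - j) = i := by omega
      exact le_of_eq (by simp [he])
  have hshift : bs.length - k + (i + (k - j)) = bs.length - j + i := by omega
  rw [hshift] at h1
  exact lt_of_le_of_lt hmono h1

theorem bsearch_eq (sA sB : List Int) (hsa : sA.Pairwise (· ≤ ·)) (hsb : sB.Pairwise (· ≤ ·)) :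
    ∀ lo hi, lo ≤ hi → hi ≤ min sA.length sB.length → feas sA sB lo →
      (∀ k, k ≤ min sA.length sB.length → feas sA sB k → k ≤ hi) →
      bsearch sA sB lo hi = gN sA sB := by
  intro lo hi
  induction lo, hi using bsearch.induct (sA := sA) (sB := sB) with
  | case1 lo hi h hc ih =>
    intro hlohi hhiN hflo hupper
    rw [bsearch, dif_pos h, if_pos hc]
    have hmid2 : (lo + hi + 1) / 2 ≤ hi := by omega
    have hmn : (lo + hi + 1) / 2 ≤ sA.length := by omega
    have hmm : (lo + hi + 1) / 2 ≤ sB.length := by omega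
    exact ih hmid2 hhiN
      ((feas_iff_getD _ _ _ hmn hmm).mpr
        (fun j hj => (checkLoop_iff sA sB _ 0).mp hc j (Nat.zero_le j) hj))
      hupper
  | case2 lo hi h hc ih =>
    intro hlohi hhiN hflo hupper
    rw [bsearch, dif_pos h, if_neg hc]
    have hmid1 : lo < (lo + hi + 1) / 2 := by omega
    have hmn : (lo + hi + 1) / 2 ≤ sA.length := by omega
    have hmm : (lo + hi + 1) / 2 ≤ sB.length := by omega
    apply ih (by omega) (by omega) hflo
    intro k hkN hfk
    by_contra hgt
    have hmle : (lo + hi + 1) / 2 ≤ k := by omega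
    have hfm : feas sA sB ((lo + hi + 1) / 2) := feas_dc sA sB hsa hmle hfk
    exact hc ((checkLoop_iff sA sB _ 0).mpr
      (fun i _ hik => ((feas_iff_getD _ _ _ hmn hmm).mp hfm) i hik))
  | case3 lo hi h =>
    intro hlohi hhiN hflo hupper
    rw [bsearch, dif_neg h]
    have hg := gN_feas sB sA hsb
    have hle1 : lo ≤ gN sA sB := gN_max sB sA lo hsb hflo
    have hN : gN sA sB ≤ min sA.length sB.length := le_min hg.1 hg.2.1
    have hle2 := hupper (gN sA sB) hN hg
    omega

-- ===== VERDICT (by name: the statement is the Claim_ definition above) =====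
theorem solution_spec : Claim_equal_solution := by
  intro A B _
  unfold Spec_solution solution solution_alt
  have hsa : (PySem.List.sorted A (fun x : Int => x) false).Pairwise (· ≤ ·) := by
    simpa using PySem.List.sorted_pairwise (xs := A) (key := fun x : Int => x)
  have hsb : (PySem.List.sorted B (fun x : Int => x) false).Pairwise (· ≤ ·) := by
    simpa using PySem.List.sorted_pairwise (xs := B) (key := fun x : Int => x)
  have hfeas0 : feas (PySem.List.sorted A (fun x : Int => x) false)
      (PySem.List.sorted B (fun x : Int => x) false) 0 :=
    ⟨Nat.zero_le _, Nat.zero_le _, by simp⟩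
  rw [loopA_eq_fA _ _ 0 0 (Nat.zero_le _), fA_eq_gN]
  simp only []
  rw [bsearch_eq _ _ hsa hsb 0 _ (Nat.zero_le _) le_rfl hfeas0 (fun k hk _ => hk)]
  simp
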